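-- pv_equiv track=rewrite | github.com/PKhing/COMP_PROG | 09_MoreDC/09_MoreDC_34.py | pattern1
-- ===== SOURCE A (Python) =====
-- def pattern1(n, m):
--     # nrows  0, ncols  0
--     tab = [[0 for j in range(m)] for i in range(n)]
--     cnt = 1
--     for i in range(n):
--         for j in range(m):
--             tab[i][j]=cnt
--             cnt+=1
--     return tab
-- ===== SOURCE B (Python) =====
-- def pattern1(n, m):
--     return [list(range(i * m + 1, i * m + m + 1)) for i in range(n)]
-- ===== Notes on version B (the rewrite author's own statement) =====
-- stated objective: simpler
-- what changed: Drops the mutable zero-filled table and the running counter: each row is produced directly as range(i*m+1, i*m+m+1), so the inner column loop and the in-place assignment disappear.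
import Mathlib
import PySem

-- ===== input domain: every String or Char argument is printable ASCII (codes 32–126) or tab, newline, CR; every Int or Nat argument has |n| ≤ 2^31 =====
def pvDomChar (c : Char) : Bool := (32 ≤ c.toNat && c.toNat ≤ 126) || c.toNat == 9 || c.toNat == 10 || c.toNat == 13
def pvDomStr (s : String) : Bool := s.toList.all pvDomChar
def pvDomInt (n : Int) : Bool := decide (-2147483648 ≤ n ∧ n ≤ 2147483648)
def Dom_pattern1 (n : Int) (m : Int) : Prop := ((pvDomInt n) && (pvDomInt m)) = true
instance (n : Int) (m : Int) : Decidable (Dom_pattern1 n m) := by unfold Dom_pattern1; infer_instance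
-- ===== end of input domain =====

-- B replaces A's zero-filled table + running counter with one range per row (simpler; no inner loop).

-- ===== PORT A =====
-- inner loop body: tab[i][j] = cnt ; cnt += 1
def pattern1InnerStep (i : Int) (st : List (List Int) × Int) (j : Int) : List (List Int) × Int :=
  (st.1.set i.toNat ((st.1.getD i.toNat []).set j.toNat st.2), st.2 + 1)

def pattern1 (n : Int) (m : Int) : List (List Int) :=
  let tab := (PySem.List.pyRange 0 n 1).map (fun _i => (PySem.List.pyRange 0 m 1).map (fun _j => (0 : Int)))
  let res := (PySem.List.pyRange 0 n 1).foldl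
    (fun st i => (PySem.List.pyRange 0 m 1).foldl (pattern1InnerStep i) st) (tab, 1)
  res.1

-- ===== PORT B =====
def pattern1_alt (n : Int) (m : Int) : List (List Int) :=
  (PySem.List.pyRange 0 n 1).map (fun i => PySem.List.pyRange (i * m + 1) (i * m + m + 1) 1)

-- ===== PRECONDITION & SPEC =====
def Spec_pattern1 (n : Int) (m : Int) (out : List (List Int)) : Prop := out = pattern1_alt n m
instance (n : Int) (m : Int) (out : List (List Int)) : Decidable (Spec_pattern1 n m out) := by unfold Spec_pattern1; infer_instance

-- ===== CLAIM (what is proved, stated in full; the proofs are below) =====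
def Claim_equal_pattern1 : Prop := ∀ (n : Int) (m : Int), Dom_pattern1 n m → Spec_pattern1 n m (pattern1 n m)

-- ===== LEMMAS AND PROOFS =====

-- The inner loop over columns a, a+1, …, a+k-1 overwrites positions a..a+k-1 of row i
-- with the consecutive counter values c, c+1, …, c+k-1.
theorem pattern1_inner_fold (i : Nat) :
    ∀ (k a : Nat) (tab : List (List Int)) (row : List Int) (c : Int),
      tab[i]? = some row → row.length = a + k →
      ((List.range k).map (fun t => ((a + t : Nat) : Int))).foldl (pattern1InnerStep (i : Int)) (tab, c)
        = (tab.set i (row.take a ++ PySem.List.pyRange c (c + (k : Int)) 1), c + (k : Int)) := by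
  intro k
  induction k with
  | zero =>
      intro a tab row c htab hlen
      obtain ⟨hi, hrow⟩ := List.getElem?_eq_some_iff.mp htab
      simp only [List.range_zero, List.map_nil, List.foldl_nil, Nat.cast_zero, add_zero]
      rw [PySem.List.pyRange_one_eq_nil (le_refl c), List.append_nil,
        List.take_of_length_le (by omega), ← hrow, List.set_getElem_self]
  | succ k ih =>
      intro a tab row c htab hlen
      obtain ⟨hi, _⟩ := List.getElem?_eq_some_iff.mp htab
      rw [List.range_succ_eq_map, List.map_cons, List.map_map, List.foldl_cons]
      have hstep : pattern1InnerStep (i : Int) (tab, c) ((a + 0 : Nat) : Int)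
          = (tab.set i (row.set a c), c + 1) := by
        simp [pattern1InnerStep, List.getD_eq_getElem?_getD, htab]
      rw [hstep]
      have hmap : (List.range k).map ((fun t => ((a + t : Nat) : Int)) ∘ Nat.succ)
          = (List.range k).map (fun t => (((a + 1) + t : Nat) : Int)) := by
        apply List.map_congr_left; intro t _
        simp only [Function.comp_apply, Nat.succ_eq_add_one]
        push_cast; ring
      rw [hmap]
      have htab' : (tab.set i (row.set a c))[i]? = some (row.set a c) :=
        List.getElem?_set_self (by omega)
      rw [ih (a + 1) _ (row.set a c) (c + 1) htab' (by simp; omega)]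
      simp only [Prod.mk.injEq, List.set_set]
      constructor
      · congr 1
        have ha : a < row.length := by omega
        rw [List.set_eq_take_append_cons_drop, if_pos ha, List.take_append]
        have htl : (row.take a).length = a := by simp; omega
        rw [htl, Nat.add_sub_cancel_left, List.take_of_length_le (by rw [htl]; omega),
          List.take_succ_cons, List.take_zero, List.append_assoc, List.singleton_append]
        congr 1
        have hr : PySem.List.pyRange c (c + ((k + 1 : Nat) : Int)) 1
            = c :: PySem.List.pyRange (c + 1) (c + 1 + (k : Int)) 1 := by
          rw [PySem.List.pyRange_one_cons (by push_cast; omega)]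
          congr 2
          push_cast; ring
        rw [hr]
      · push_cast; ring

-- The full inner loop: row i (of length m.toNat) becomes pyRange c (c + m.toNat) 1.
theorem pattern1_inner_full (m : Int) (i : Nat) (tab : List (List Int)) (row : List Int) (c : Int)
    (htab : tab[i]? = some row) (hlen : row.length = m.toNat) :
    (PySem.List.pyRange 0 m 1).foldl (pattern1InnerStep (i : Int)) (tab, c)
      = (tab.set i (PySem.List.pyRange c (c + (m.toNat : Int)) 1), c + (m.toNat : Int)) := by
  have h0 : PySem.List.pyRange 0 m 1
      = (List.range m.toNat).map (fun t => ((0 + t : Nat) : Int)) := by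
    rw [PySem.List.pyRange_one]
    simp
  rw [h0, pattern1_inner_fold i m.toNat 0 tab row c htab (by omega)]
  simp

-- The outer loop over rows s, s+1, …, s+k-1 replaces those rows by consecutive ranges
-- and advances the counter by k·m.toNat.
theorem pattern1_outer_fold (m : Int) :
    ∀ (k s : Nat) (tab : List (List Int)) (c : Int),
      s + k ≤ tab.length →
      (∀ t, t < k → (tab[s + t]?.getD []).length = m.toNat) →
      ((List.range k).map (fun t => ((s + t : Nat) : Int))).foldl
          (fun st i => (PySem.List.pyRange 0 m 1).foldl (pattern1InnerStep i) st) (tab, c)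
        = (tab.take s
            ++ (List.range k).map (fun t =>
                 PySem.List.pyRange (c + ((t * m.toNat : Nat) : Int))
                   (c + ((t * m.toNat : Nat) : Int) + (m.toNat : Int)) 1)
            ++ tab.drop (s + k),
           c + ((k * m.toNat : Nat) : Int)) := by
  intro k
  induction k with
  | zero =>
      intro s tab c hs hrows
      simp
  | succ k ih =>
      intro s tab c hs hrows
      rw [List.range_succ_eq_map, List.map_cons, List.map_map, List.foldl_cons]
      have hi : s < tab.length := by omega
      have htab : tab[s]? = some tab[s] := List.getElem?_eq_getElem hi
      have hlen : tab[s].length = m.toNat := by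
        have := hrows 0 (by omega)
        simpa [htab] using this
      rw [show ((s + 0 : Nat) : Int) = ((s : Nat) : Int) by simp]
      rw [pattern1_inner_full m s tab tab[s] c htab hlen]
      have hmap : (List.range k).map ((fun t => ((s + t : Nat) : Int)) ∘ Nat.succ)
          = (List.range k).map (fun t => (((s + 1) + t : Nat) : Int)) := by
        apply List.map_congr_left; intro t _
        simp only [Function.comp_apply, Nat.succ_eq_add_one]
        push_cast; ring
      rw [hmap]
      set M : Nat := m.toNat with hM
      set R0 := PySem.List.pyRange c (c + (M : Int)) 1 with hR0
      have hrows' : ∀ t, t < k → ((tab.set s R0)[(s + 1) + t]?.getD []).length = M := by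
        intro t ht
        rw [List.getElem?_set_ne (by omega)]
        have := hrows (1 + t) (by omega)
        simpa [Nat.add_assoc] using this
      rw [ih (s + 1) (tab.set s R0) (c + (M : Int)) (by simp; omega) hrows']
      have hdecomp : tab.set s R0 = tab.take s ++ R0 :: tab.drop (s + 1) := by
        rw [List.set_eq_take_append_cons_drop, if_pos hi]
      have htl : (tab.take s).length = s := by simp; omega
      simp only [Prod.mk.injEq]
      constructor
      · rw [hdecomp, List.take_append, htl, Nat.add_sub_cancel_left,
          List.take_of_length_le (by omega), List.take_succ_cons, List.take_zero,
          List.drop_append, htl]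
        have hd1 : (tab.take s).drop ((s + 1) + k) = [] :=
          List.drop_eq_nil_of_le (by omega)
        rw [hd1, List.nil_append]
        have hd2 : (R0 :: tab.drop (s + 1)).drop ((s + 1) + k - s)
            = tab.drop (s + (k + 1)) := by
          rw [show (s + 1) + k - s = k + 1 by omega, List.drop_succ_cons, List.drop_drop]
          congr 1; omega
        rw [hd2]
        simp only [List.map_cons, List.map_map, Nat.zero_mul, Nat.cast_zero, add_zero,
          List.append_assoc, List.cons_append, List.nil_append]
        congr 3
        apply List.map_congr_left; intro t _
        simp only [Function.comp_apply, Nat.succ_eq_add_one]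
        congr 1 <;> push_cast <;> ring
      · push_cast; ring

-- ===== VERDICT (by name: the statement is the Claim_ definition above) =====
theorem pattern1_spec : Claim_equal_pattern1 := by
  intro n m _
  unfold Spec_pattern1 pattern1 pattern1_alt
  have hN : PySem.List.pyRange 0 n 1
      = (List.range n.toNat).map (fun t => ((0 + t : Nat) : Int)) := by
    rw [PySem.List.pyRange_one]; simp
  set N : Nat := n.toNat with hNdef
  set M : Nat := m.toNat with hMdef
  set zeros := (PySem.List.pyRange 0 m 1).map (fun _j => (0 : Int)) with hzeros
  have hzlen : zeros.length = M := by
    rw [hzeros]; simp [PySem.List.length_pyRange_one, hMdef]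
  set tab0 := (PySem.List.pyRange 0 n 1).map (fun _i => zeros) with htab0
  have htab0len : tab0.length = N := by
    rw [htab0]; simp [PySem.List.length_pyRange_one, hNdef]
  have hrows : ∀ t, t < N → (tab0[0 + t]?.getD []).length = M := by
    intro t ht
    have : tab0[0 + t]? = some zeros := by
      rw [htab0, List.getElem?_map]
      rw [List.getElem?_eq_getElem (by simp [PySem.List.length_pyRange_one]; omega)]
      simp
    rw [this, Option.getD_some, hzlen]
  have := pattern1_outer_fold m N 0 tab0 1 (by omega) hrows
  simp only [hN]
  rw [this]
  simp only [List.take_zero, List.nil_append, Nat.zero_add]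
  rw [List.drop_eq_nil_of_le (by omega), List.append_nil, List.map_map]
  apply List.map_congr_left
  intro t ht
  simp only [Function.comp_apply]
  by_cases hm : 0 ≤ m
  · congr 1 <;> push_cast [Int.toNat_of_nonneg hm] <;> ring
  · have hM0 : m.toNat = 0 := by omega
    have h1 : (1 : Int) + ((t * m.toNat : Nat) : Int) + (m.toNat : Int)
        ≤ 1 + ((t * m.toNat : Nat) : Int) := by simp [hM0]
    have h2 : ((t : Nat) : Int) * m + m + 1 ≤ ((t : Nat) : Int) * m + 1 := by linarith
    rw [PySem.List.pyRange_one_eq_nil h1, PySem.List.pyRange_one_eq_nil h2]
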